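-- pv_equiv track=rewrite | github.com/NataliaSRiber/Trybe_P33_M4_Restaurant_Orders | src/analyze_log.py | days_customer_not_eat_out
-- ===== SOURCE A (Python) =====
-- def days_customer_not_eat_out(customer, data):
--     all_open_days = set()
--     customer_eat_out_days = set()
--     for order in data:
--         all_open_days.add(order[2])
--         if order[0] == customer:
--             customer_eat_out_days.add(order[2])
--     return all_open_days.difference(customer_eat_out_days)
-- ===== SOURCE B (Python) =====
-- def days_customer_not_eat_out(customer, data):
--     by_day = {}
--     for order in data:
--         by_day.setdefault(order[2], set()).add(order[0])
--     return {day for day, custs in by_day.items() if customer not in custs}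
-- ===== Notes on version B (the rewrite author's own statement) =====
-- stated objective: alternative
-- what changed: Instead of accumulating two separate day-sets and taking their set difference, B groups data into a dict mapping each day to the set of customers who ordered that day, then filters the grouped days by customer membership.
import Mathlib
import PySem

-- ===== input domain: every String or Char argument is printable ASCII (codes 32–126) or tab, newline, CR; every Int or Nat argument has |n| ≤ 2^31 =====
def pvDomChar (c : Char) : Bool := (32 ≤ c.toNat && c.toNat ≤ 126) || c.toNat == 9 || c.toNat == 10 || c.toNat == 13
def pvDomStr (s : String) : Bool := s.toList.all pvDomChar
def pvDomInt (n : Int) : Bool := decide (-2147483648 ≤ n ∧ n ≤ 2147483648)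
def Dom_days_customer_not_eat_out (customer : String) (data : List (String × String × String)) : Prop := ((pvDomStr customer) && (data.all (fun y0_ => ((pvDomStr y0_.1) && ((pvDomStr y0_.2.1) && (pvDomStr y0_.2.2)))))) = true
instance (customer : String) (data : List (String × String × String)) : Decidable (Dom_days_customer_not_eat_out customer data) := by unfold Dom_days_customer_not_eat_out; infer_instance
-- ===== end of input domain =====

-- B groups orders into a per-day customer index (dict day -> set of customers) and filters the
-- grouped days, instead of A's two accumulated day-sets and a set difference; same cost, alternative structure.

-- ===== PORT A =====
def days_customer_not_eat_out (customer : String) (data : List (String × String × String)) : List String :=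
  let st := data.foldl
    (fun (st : PySem.Set String × PySem.Set String) order =>
      (PySem.Set.add st.1 order.2.2,
       if order.1 == customer then PySem.Set.add st.2 order.2.2 else st.2))
    (PySem.Set.empty, PySem.Set.empty)
  PySem.Set.diff st.1 st.2

-- ===== PORT B =====
def days_customer_not_eat_out_alt (customer : String) (data : List (String × String × String)) : List String :=
  let byDay : PySem.Dict String (PySem.Set String) :=
    data.foldl
      (fun d order => d.modify order.2.2 PySem.Set.empty (fun s => PySem.Set.add s order.1))
      PySem.Dict.empty
  (byDay.items.filter (fun p => !(PySem.Set.contains p.2 customer))).map (fun p => p.1)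

-- ===== PRECONDITION & SPEC =====
def Spec_days_customer_not_eat_out (customer : String) (data : List (String × String × String)) (out : List String) : Prop := out = days_customer_not_eat_out_alt customer data
instance (customer : String) (data : List (String × String × String)) (out : List String) : Decidable (Spec_days_customer_not_eat_out customer data out) := by unfold Spec_days_customer_not_eat_out; infer_instance

-- ===== CLAIM (what is proved, stated in full; the proofs are below) =====
def Claim_equal_days_customer_not_eat_out : Prop := ∀ (customer : String) (data : List (String × String × String)), Dom_days_customer_not_eat_out customer data → Spec_days_customer_not_eat_out customer data (days_customer_not_eat_out customer data)

-- ===== LEMMAS AND PROOFS =====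

-- A's paired fold splits into two independent folds.
theorem pvA_fold_split (customer : String) (data : List (String × String × String))
    (all cust : PySem.Set String) :
    data.foldl
      (fun (st : PySem.Set String × PySem.Set String) order =>
        (PySem.Set.add st.1 order.2.2,
         if order.1 == customer then PySem.Set.add st.2 order.2.2 else st.2))
      (all, cust)
    = (data.foldl (fun s order => PySem.Set.add s order.2.2) all,
       data.foldl (fun s order => if order.1 == customer then PySem.Set.add s order.2.2 else s) cust) := by
  induction data generalizing all cust with
  | nil => rfl
  | cons o t ih => simp only [List.foldl_cons, ih]

-- Membership in A's customer-days accumulator.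
theorem pvA_cust_mem (customer : String) (data : List (String × String × String))
    (cust : PySem.Set String) (k : String) :
    k ∈ data.foldl (fun s order => if order.1 == customer then PySem.Set.add s order.2.2 else s) cust
      ↔ k ∈ cust ∨ ∃ o ∈ data, o.1 = customer ∧ o.2.2 = k := by
  induction data generalizing cust with
  | nil => simp
  | cons o t ih =>
    simp only [List.foldl_cons, ih, List.mem_cons]
    by_cases h : o.1 = customer
    · simp [h, PySem.Set.mem_add]
      rw [eq_comm (a := k)]
      exact or_assoc
    · simp [h]

-- Lookup of a day in B's grouping dict.
theorem pvB_getD (data : List (String × String × String))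
    (d : PySem.Dict String (PySem.Set String)) (k : String) :
    (data.foldl
        (fun d order => d.modify order.2.2 PySem.Set.empty (fun s => PySem.Set.add s order.1)) d).getD
        k PySem.Set.empty
    = PySem.Set.update (d.getD k PySem.Set.empty)
        ((data.filter (fun o => o.2.2 == k)).map (fun o => o.1)) := by
  induction data generalizing d with
  | nil => simp [PySem.Set.update_nil]
  | cons o t ih =>
    simp only [List.foldl_cons, ih, List.filter_cons]
    by_cases h : o.2.2 = k
    · simp [h, PySem.Dict.getD_modify_self, PySem.Set.update_cons]
    · have h' : (o.2.2 == k) = false := by simpa using h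
      rw [PySem.Dict.getD_modify_of_ne _ PySem.Set.empty _ (fun hh => h hh.symm)]
      simp [h']

-- The two filter predicates agree on every day.
theorem pvPred_agree (customer : String) (data : List (String × String × String)) (k : String) :
    PySem.Set.contains
        ((data.foldl
            (fun d order => d.modify order.2.2 PySem.Set.empty (fun s => PySem.Set.add s order.1))
            PySem.Dict.empty).getD k PySem.Set.empty) customer
      = PySem.Set.contains
          (data.foldl (fun s order => if order.1 == customer then PySem.Set.add s order.2.2 else s)
            PySem.Set.empty) k := by
  rw [Bool.eq_iff_iff]
  rw [PySem.Set.contains_iff, PySem.Set.contains_iff, pvB_getD, pvA_cust_mem]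
  simp only [PySem.Dict.getD_empty, PySem.Set.update_empty, PySem.Set.mem_ofList, List.mem_map,
    List.mem_filter]
  constructor
  · rintro ⟨o, ⟨ho, hk⟩, hc⟩
    exact Or.inr ⟨o, ho, hc, by simpa using hk⟩
  · rintro (hmem | ⟨o, ho, hc, hk⟩)
    · exact absurd hmem (List.not_mem_nil)
    · exact ⟨o, ⟨ho, by simpa using hk⟩, hc⟩

-- ===== VERDICT (by name: the statement is the Claim_ definition above) =====
theorem days_customer_not_eat_out_spec : Claim_equal_days_customer_not_eat_out := by
  intro customer data _
  unfold Spec_days_customer_not_eat_out days_customer_not_eat_out days_customer_not_eat_out_alt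
  simp only [pvA_fold_split]
  set byDay : PySem.Dict String (PySem.Set String) :=
    data.foldl
      (fun d order => d.modify order.2.2 PySem.Set.empty (fun s => PySem.Set.add s order.1))
      PySem.Dict.empty with hbyDay
  have hnd : byDay.keys.Nodup := by
    rw [hbyDay]
    exact PySem.Dict.nodup_keys_foldl_modify_key data (fun o => o.2.2) PySem.Set.empty
      (fun _ o s => PySem.Set.add s o.1) PySem.Dict.empty PySem.Dict.nodup_keys_empty
  have hkeys : byDay.keys = PySem.Set.ofList (data.map (fun o => o.2.2)) := by
    rw [hbyDay]
    have h := PySem.Dict.keys_foldl_modify_key data (fun o => o.2.2) PySem.Set.empty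
      (fun _ o s => PySem.Set.add s o.1) PySem.Dict.empty
    simpa [PySem.Dict.keys_empty, PySem.Set.update_nil_left] using h
  have hfoldA : data.foldl (fun s order => PySem.Set.add s order.2.2) PySem.Set.empty
      = PySem.Set.ofList (data.map (fun o => o.2.2)) := by
    rw [← PySem.Set.update_map_eq_foldl_add, PySem.Set.update_empty]
  rw [PySem.Dict.items_eq_map_keys byDay hnd PySem.Set.empty]
  simp only [List.filter_map, List.map_map, Function.comp_def, List.map_id', PySem.Set.diff]
  rw [hfoldA, ← hkeys]
  apply List.filter_congr
  intro k hk
  simp only [hbyDay, pvPred_agree]
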